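-- pv_equiv track=rewrite | github.com/anastasia-dg/AyED1-2024-TPs | TP03/ejercicio4.py | encontrar_maxima_produccion_dia_y_fabrica
-- ===== SOURCE A (Python) =====
-- def encontrar_maxima_produccion_dia_y_fabrica(matriz):
--
--     max_produccion = 0
--     dia_max = 0
--     fabrica_max = 0
--     for i, fila in enumerate(matriz):
--         for j, produccion in enumerate(fila):
--             if produccion > max_produccion:
--                 max_produccion = produccion
--                 dia_max = j + 1
--                 fabrica_max = i + 1
--     return dia_max, fabrica_max, max_produccion
-- ===== SOURCE B (Python) =====
-- def encontrar_maxima_produccion_dia_y_fabrica(matriz):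
--     # Pass 1: global maximum value (default 0 for empty data).
--     valores = [v for fila in matriz for v in fila]
--     m = max(valores, default=0)
--     if m <= 0:
--         return 0, 0, 0
--     # Pass 2: first row (factory) containing m, and first position in it.
--     for i, fila in enumerate(matriz):
--         if m in fila:
--             return fila.index(m) + 1, i + 1, m
-- ===== Notes on version B (the rewrite author's own statement) =====
-- stated objective: alternative
-- what changed: Replaces the single-pass running-argmax with threaded (max, day, factory) state by two independent passes: first compute the global maximum value (default 0), then, if it is positive, locate its first row-major occurrence with a membership test and list.index.
import Mathlib
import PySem

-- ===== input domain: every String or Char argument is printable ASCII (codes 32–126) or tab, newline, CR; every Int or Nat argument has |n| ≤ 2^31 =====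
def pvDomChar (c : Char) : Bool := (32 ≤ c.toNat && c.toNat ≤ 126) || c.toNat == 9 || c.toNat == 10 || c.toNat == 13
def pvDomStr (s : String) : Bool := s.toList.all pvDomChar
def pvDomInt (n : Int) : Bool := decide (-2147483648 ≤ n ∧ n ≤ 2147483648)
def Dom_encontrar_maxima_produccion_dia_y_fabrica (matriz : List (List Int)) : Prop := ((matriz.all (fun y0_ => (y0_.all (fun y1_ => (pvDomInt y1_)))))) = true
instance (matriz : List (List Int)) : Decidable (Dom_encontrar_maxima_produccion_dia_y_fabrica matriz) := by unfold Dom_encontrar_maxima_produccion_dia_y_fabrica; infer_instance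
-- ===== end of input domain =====

-- B replaces A's single-pass running argmax with two passes (global max, then
-- first row-major position of that max); objective: alternative decomposition.

-- ===== PORT A =====
-- inner loop: for j, produccion in enumerate(fila): if produccion > max: update
-- state s = (max_produccion, dia_max, fabrica_max)
def pvRowGoA (i j : Nat) (s : Int × Int × Int) : List Int → Int × Int × Int
  | [] => s
  | v :: t => pvRowGoA i (j + 1) (if v > s.1 then (v, (j : Int) + 1, (i : Int) + 1) else s) t

-- outer loop: for i, fila in enumerate(matriz)
def pvRowsGoA (i : Nat) (s : Int × Int × Int) : List (List Int) → Int × Int × Int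
  | [] => s
  | fila :: rest => pvRowsGoA (i + 1) (pvRowGoA i 0 s fila) rest

def encontrar_maxima_produccion_dia_y_fabrica (matriz : List (List Int)) : Int × Int × Int :=
  let s := pvRowsGoA 0 (0, 0, 0) matriz
  (s.2.1, s.2.2, s.1)

-- ===== PORT B =====
-- for i, fila in enumerate(matriz): if m in fila: return fila.index(m)+1, i+1, m
-- ('m in fila' together with 'fila.index(m)' is exactly 'index? fila m = some k')
def pvSearchB (m : Int) (i : Nat) : List (List Int) → Int × Int × Int
  | [] => (0, 0, 0)   -- unreachable in B (m > 0 occurs in matriz); Python falls off the loop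
  | fila :: rest =>
      match PySem.List.index? fila m with
      | some k => ((k : Int) + 1, (i : Int) + 1, m)
      | none => pvSearchB m (i + 1) rest

def encontrar_maxima_produccion_dia_y_fabrica_alt (matriz : List (List Int)) : Int × Int × Int :=
  let valores := matriz.flatMap (fun fila => fila)
  let m := (PySem.List.max? valores (fun y => y)).getD 0
  if m ≤ 0 then (0, 0, 0)
  else pvSearchB m 0 matriz

-- ===== PRECONDITION & SPEC =====
def Spec_encontrar_maxima_produccion_dia_y_fabrica (matriz : List (List Int)) (out : Int × Int × Int) : Prop := out = encontrar_maxima_produccion_dia_y_fabrica_alt matriz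
instance (matriz : List (List Int)) (out : Int × Int × Int) : Decidable (Spec_encontrar_maxima_produccion_dia_y_fabrica matriz out) := by unfold Spec_encontrar_maxima_produccion_dia_y_fabrica; infer_instance

-- ===== CLAIM (what is proved, stated in full; the proofs are below) =====
def Claim_equal_encontrar_maxima_produccion_dia_y_fabrica : Prop := ∀ (matriz : List (List Int)), Dom_encontrar_maxima_produccion_dia_y_fabrica matriz → Spec_encontrar_maxima_produccion_dia_y_fabrica matriz (encontrar_maxima_produccion_dia_y_fabrica matriz)

-- ===== LEMMAS AND PROOFS =====

-- the inner loop keeps its state when no element beats the running max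
theorem pvRowGoA_keep (i j : Nat) (s : Int × Int × Int) (fila : List Int)
    (h : ∀ v ∈ fila, v ≤ s.1) : pvRowGoA i j s fila = s := by
  induction fila generalizing j with
  | nil => rfl
  | cons v t ih =>
      have hv : v ≤ s.1 := h v (List.mem_cons_self ..)
      simp only [pvRowGoA, if_neg (not_lt.mpr hv)]
      exact ih (j + 1) fun x hx => h x (List.mem_cons_of_mem _ hx)

-- the outer loop keeps its state when no element beats the running max
theorem pvRowsGoA_keep (i : Nat) (s : Int × Int × Int) (rows : List (List Int))
    (h : ∀ fila ∈ rows, ∀ v ∈ fila, v ≤ s.1) : pvRowsGoA i s rows = s := by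
  induction rows generalizing i with
  | nil => rfl
  | cons fila rest ih =>
      simp only [pvRowsGoA, pvRowGoA_keep i 0 s fila (h fila (List.mem_cons_self ..))]
      exact ih (i + 1) fun f hf => h f (List.mem_cons_of_mem _ hf)

-- the running max of the inner loop stays below any strict bound of the row
theorem pvRowGoA_bound (m : Int) (i j : Nat) (s : Int × Int × Int) (fila : List Int)
    (hs : s.1 < m) (h : ∀ v ∈ fila, v < m) : (pvRowGoA i j s fila).1 < m := by
  induction fila generalizing j s with
  | nil => exact hs
  | cons v t ih =>
      simp only [pvRowGoA]
      refine ih _ _ ?_ fun x hx => h x (List.mem_cons_of_mem _ hx)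
      split
      · exact h v (List.mem_cons_self ..)
      · exact hs

-- a row containing the global max m drives the inner loop to (m, first index + 1)
theorem pvRowGoA_hit (m : Int) (i j k : Nat) (s : Int × Int × Int) (fila : List Int)
    (hs : s.1 < m) (hle : ∀ v ∈ fila, v ≤ m)
    (hidx : PySem.List.index? fila m = some k) :
    pvRowGoA i j s fila = (m, (j : Int) + (k : Int) + 1, (i : Int) + 1) := by
  induction fila generalizing j k s with
  | nil => simp [PySem.List.index?] at hidx
  | cons v t ih =>
      by_cases hv : v = m
      · subst hv
        rw [PySem.List.index?_cons_self] at hidx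
        obtain rfl : k = 0 := by injection hidx with h; omega
        simp only [pvRowGoA, if_pos hs]
        rw [pvRowGoA_keep i (j + 1) _ t (by simpa using hle · <| List.mem_cons_of_mem _ ·)]
        simp
      · rw [PySem.List.index?_cons_of_ne t hv] at hidx
        obtain ⟨k', hk', rfl⟩ := Option.map_eq_some_iff.mp hidx
        have hvlt : v < m := lt_of_le_of_ne (hle v (List.mem_cons_self ..)) hv
        simp only [pvRowGoA]
        have hs' : (if v > s.1 then (v, (j : Int) + 1, (i : Int) + 1) else s).1 < m := by
          split <;> [exact hvlt; exact hs]
        rw [ih (j + 1) k' _ hs' (fun x hx => hle x (List.mem_cons_of_mem _ hx)) hk']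
        congr 2
        push_cast
        ring

-- main lemma: under the global max m, A's loop and B's search match
theorem pvMain (m : Int) (rows : List (List Int)) (i : Nat) (s : Int × Int × Int)
    (hs : s.1 < m) (hle : ∀ fila ∈ rows, ∀ v ∈ fila, v ≤ m)
    (hmem : ∃ fila ∈ rows, m ∈ fila) :
    ∃ d f : Int, pvSearchB m i rows = (d, f, m) ∧ pvRowsGoA i s rows = (m, d, f) := by
  induction rows generalizing i s with
  | nil => simp at hmem
  | cons fila rest ih =>
      by_cases hin : m ∈ fila
      · obtain ⟨k, hk⟩ := Option.isSome_iff_exists.mp ((PySem.List.index?_isSome_iff fila m).mpr hin)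
        refine ⟨(k : Int) + 1, (i : Int) + 1, ?_, ?_⟩
        · simp only [pvSearchB]
          rw [PySem.List.index?_eq_idxOf?] at hk
          simp [hk]
        · simp only [pvRowsGoA]
          rw [pvRowGoA_hit m i 0 k s fila hs (hle fila (List.mem_cons_self ..)) hk]
          rw [pvRowsGoA_keep (i + 1) _ rest
            (fun f hf v hv => hle f (List.mem_cons_of_mem _ hf) v hv)]
          simp
      · have hidx : PySem.List.index? fila m = none :=
          (PySem.List.index?_eq_none_iff fila m).mpr hin
        have hlt : ∀ v ∈ fila, v < m := fun v hv =>
          lt_of_le_of_ne (hle fila (List.mem_cons_self ..) v hv) (fun h => hin (h ▸ hv))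
        have hmem' : ∃ f ∈ rest, m ∈ f := by
          obtain ⟨f, hf, hmf⟩ := hmem
          rcases List.mem_cons.mp hf with rfl | hf'
          · exact absurd hmf hin
          · exact ⟨f, hf', hmf⟩
        obtain ⟨d, f, h1, h2⟩ := ih (i + 1) (pvRowGoA i 0 s fila)
          (pvRowGoA_bound m i 0 s fila hs hlt)
          (fun g hg => hle g (List.mem_cons_of_mem _ hg)) hmem'
        refine ⟨d, f, ?_, by simpa [pvRowsGoA] using h2⟩
        simp only [pvSearchB]
        rw [PySem.List.index?_eq_idxOf?] at hidx
        simp [hidx, h1]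

-- ===== VERDICT (by name: the statement is the Claim_ definition above) =====
theorem encontrar_maxima_produccion_dia_y_fabrica_spec : Claim_equal_encontrar_maxima_produccion_dia_y_fabrica := by
  intro matriz _
  show _ = _
  unfold encontrar_maxima_produccion_dia_y_fabrica encontrar_maxima_produccion_dia_y_fabrica_alt
  set valores := matriz.flatMap (fun fila => fila) with hval
  cases hmx : PySem.List.max? valores (fun y => y) with
  | none =>
      have hnil : valores = [] := (PySem.List.max?_eq_none_iff _ _).mp hmx
      have hall : ∀ fila ∈ matriz, ∀ v ∈ fila, v ≤ (0 : Int) := by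
        intro fila hf v hv
        exact absurd (List.mem_flatMap.mpr ⟨fila, hf, hv⟩) (hnil ▸ List.not_mem_nil)
      simp [hmx, pvRowsGoA_keep 0 (0,0,0) matriz hall]
  | some m =>
      have hmem : m ∈ valores := PySem.List.max?_mem hmx
      have hle : ∀ v ∈ valores, v ≤ m := PySem.List.max?_isMax hmx
      have hle' : ∀ fila ∈ matriz, ∀ v ∈ fila, v ≤ m := fun fila hf v hv =>
        hle v (List.mem_flatMap.mpr ⟨fila, hf, hv⟩)
      by_cases hm : m ≤ 0
      · have hall : ∀ fila ∈ matriz, ∀ v ∈ fila, v ≤ (0 : Int) := fun fila hf v hv =>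
          le_trans (hle' fila hf v hv) hm
        simp [hmx, hm, pvRowsGoA_keep 0 (0,0,0) matriz hall]
      · obtain ⟨fila, hf, hmf⟩ := List.mem_flatMap.mp hmem
        obtain ⟨d, f, h1, h2⟩ := pvMain m matriz 0 (0,0,0) (by omega) hle' ⟨fila, hf, hmf⟩
        simp [hmx, hm, h1, h2]
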